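-- pv_equiv track=rewrite | github.com/santiagocasas/clapp | longclapp-ag2-swarm.py | clean_code_for_execution
-- ===== SOURCE A (Python) =====
-- def clean_code_for_execution(code):
--     """Remove plt.show() calls and add plt.savefig() for proper plot capture."""
--     # Split code into lines
--     lines = code.split('\n')
--     cleaned_lines = []
--
--     # Track if we're in a code block
--     in_code_block = False
--     has_plotting = False
--
--     for line in lines:
--         # Check for code block markers
--         if line.startswith('```'):
--             if in_code_block:
--                 # End of code block, add savefig if needed
--                 if has_plotting:
--                     cleaned_lines.append("fig = plt.gcf()")
--                     cleaned_lines.append("fig.savefig('plot.png', dpi=300, bbox_inches='tight')")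
--                     cleaned_lines.append("plt.close('all')")
--                 in_code_block = False
--                 has_plotting = False
--             else:
--                 in_code_block = True
--             cleaned_lines.append(line)
--             continue
--
--         if in_code_block:
--             # Skip plt.show() calls
--             if 'plt.show()' in line:
--                 continue
--             # Skip other problematic statements
--             if line.strip().startswith('show('):
--                 continue
--             # Check for plotting commands
--             if any(plot_cmd in line for plot_cmd in ['plt.plot', 'plt.scatter', 'plt.bar', 'plt.hist', 'plt.imshow', 'plt.figure', 'plt.subplot']):
--                 has_plotting = True
--             cleaned_lines.append(line)
--         else:
--             cleaned_lines.append(line)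
--
--     return '\n'.join(cleaned_lines)
-- ===== SOURCE B (Python) =====
-- PLOT_CMDS = ['plt.plot', 'plt.scatter', 'plt.bar', 'plt.hist', 'plt.imshow', 'plt.figure', 'plt.subplot']
-- SAVEFIG = ["fig = plt.gcf()", "fig.savefig('plot.png', dpi=300, bbox_inches='tight')", "plt.close('all')"]
--
--
-- def _filter_body(body):
--     kept = [l for l in body
--             if 'plt.show()' not in l and not l.strip().startswith('show(')]
--     plotting = any(cmd in l for l in kept for cmd in PLOT_CMDS)
--     return kept, plotting
--
--
-- def clean_code_for_execution(code):
--     """Remove plt.show() calls and add plt.savefig() for proper plot capture."""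
--     lines = code.split('\n')
--     fences = [i for i, l in enumerate(lines) if l.startswith('```')]
--     out = []
--     prev = 0
--     # consecutive fence pairs delimit the closed code blocks
--     for k in range(0, len(fences) - 1, 2):
--         a, b = fences[k], fences[k + 1]
--         out += lines[prev:a + 1]                       # prose + opening fence, verbatim
--         kept, plotting = _filter_body(lines[a + 1:b])  # filtered block body
--         out += kept
--         if plotting:
--             out += SAVEFIG
--         out.append(lines[b])                           # closing fence
--         prev = b + 1
--     if len(fences) % 2 == 1:
--         a = fences[-1]
--         out += lines[prev:a + 1]
--         out += _filter_body(lines[a + 1:])[0]          # unclosed trailing block: filtered, no savefig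
--     else:
--         out += lines[prev:]
--     return '\n'.join(out)
-- ===== Notes on version B (the rewrite author's own statement) =====
-- stated objective: alternative
-- what changed: A's flat line-by-line in_code_block/has_plotting state machine is replaced by a staged pipeline: B first builds the list of fence-line indices with one enumerate comprehension, then pairs consecutive fences and assembles the output from verbatim slices between blocks plus per-block filtered bodies with savefig appended before each closing fence.
import Mathlib
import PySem

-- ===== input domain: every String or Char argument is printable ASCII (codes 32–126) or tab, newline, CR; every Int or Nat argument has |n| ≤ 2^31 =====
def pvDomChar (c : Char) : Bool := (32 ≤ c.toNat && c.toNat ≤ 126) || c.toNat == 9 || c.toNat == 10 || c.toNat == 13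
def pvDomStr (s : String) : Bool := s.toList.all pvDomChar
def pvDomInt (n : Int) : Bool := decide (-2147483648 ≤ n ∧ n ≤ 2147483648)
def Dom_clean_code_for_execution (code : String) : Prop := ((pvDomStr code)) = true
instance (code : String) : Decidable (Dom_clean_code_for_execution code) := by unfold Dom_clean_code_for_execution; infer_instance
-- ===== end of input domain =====

-- B builds the fence-index list first, pairs the fences, and assembles the output from
-- slices between paired fences, instead of A's line-by-line state machine
-- (objective: alternative decomposition, same cost).

-- shared string constants / line tests (both Pythons use the same literals)
def pvFence (l : List Char) : Bool := PySem.Chars.startswith l "```".toList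
def pvShowCall : List Char := "plt.show()".toList
def pvShowParen : List Char := "show(".toList
def pvPlotCmds : List (List Char) :=
  ["plt.plot".toList, "plt.scatter".toList, "plt.bar".toList, "plt.hist".toList,
   "plt.imshow".toList, "plt.figure".toList, "plt.subplot".toList]
def pvPlot (l : List Char) : Bool := pvPlotCmds.any (fun c => PySem.Chars.isIn c l)
def pvSavefig : List (List Char) :=
  ["fig = plt.gcf()".toList,
   "fig.savefig('plot.png', dpi=300, bbox_inches='tight')".toList,
   "plt.close('all')".toList]

-- ===== PORT A =====
-- state = (in_code_block, has_plotting, cleaned_lines)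
def cleanStep (s : Bool × Bool × List (List Char)) (line : List Char) :
    Bool × Bool × List (List Char) :=
  if pvFence line then
    if s.1 then (false, false, s.2.2 ++ (if s.2.1 then pvSavefig else []) ++ [line])
    else (true, s.2.1, s.2.2 ++ [line])
  else
    if s.1 then
      if PySem.Chars.isIn pvShowCall line then s
      else if PySem.Chars.startswith (PySem.Chars.strip line) pvShowParen then s
      else (s.1, s.2.1 || pvPlot line, s.2.2 ++ [line])
    else (s.1, s.2.1, s.2.2 ++ [line])

def clean_code_for_execution (code : String) : String :=
  let lines := PySem.Chars.splitOn code.toList ['\n']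
  let r := lines.foldl cleanStep (false, false, [])
  String.ofList (PySem.Chars.join ['\n'] r.2.2)

-- ===== PORT B =====
-- the two per-line skip tests of _filter_body's comprehension
def pvKeep (l : List Char) : Bool :=
  !(PySem.Chars.isIn pvShowCall l) && !(PySem.Chars.startswith (PySem.Chars.strip l) pvShowParen)

-- _filter_body: (kept lines, plotting flag)
def pvFilterBody (body : List (List Char)) : List (List Char) × Bool :=
  let kept := body.filter pvKeep
  (kept, kept.any pvPlot)

-- fences = [i for i, l in enumerate(lines) if l.startswith('```')]
def pvFences (lines : List (List Char)) : List Nat :=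
  (List.range lines.length).filter (fun i => pvFence (lines.getD i []))

-- the pairwise loop over fences plus the trailing odd-fence / no-fence cases;
-- the Python slices lines[prev:a+1] etc. have 0 ≤ prev ≤ a+1 ≤ len(lines), so
-- drop/take is exactly Python's slice, and lines[b] with b < len(lines) is getD
def pvBlocks (lines : List (List Char)) : Nat → List Nat → List (List Char)
  | prev, a :: b :: fs =>
      (lines.drop prev).take (a + 1 - prev) ++
      (let r := pvFilterBody ((lines.drop (a + 1)).take (b - (a + 1)))
       r.1 ++ (if r.2 then pvSavefig else []) ++ [lines.getD b []]) ++
      pvBlocks lines (b + 1) fs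
  | prev, [a] =>
      (lines.drop prev).take (a + 1 - prev) ++ (pvFilterBody (lines.drop (a + 1))).1
  | prev, [] => lines.drop prev

def clean_code_for_execution_alt (code : String) : String :=
  let lines := PySem.Chars.splitOn code.toList ['\n']
  String.ofList (PySem.Chars.join ['\n'] (pvBlocks lines 0 (pvFences lines)))

-- ===== PRECONDITION & SPEC =====
def Spec_clean_code_for_execution (code : String) (out : String) : Prop := out = clean_code_for_execution_alt code
instance (code : String) (out : String) : Decidable (Spec_clean_code_for_execution code out) := by unfold Spec_clean_code_for_execution; infer_instance

-- ===== CLAIM (what is proved, stated in full; the proofs are below) =====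
def Claim_equal_clean_code_for_execution : Prop := ∀ (code : String), Dom_clean_code_for_execution code → Spec_clean_code_for_execution code (clean_code_for_execution code)

-- ===== LEMMAS AND PROOFS =====

-- proof-only intermediate: A's flat pass seen as an outer recursion over blocks
-- (inner scan of one code block: filtered body, plotting flag, closing fence + remainder if closed)
def pvScan (plot : Bool) : List (List Char) → List (List Char) × Bool × Option (List Char × List (List Char))
  | [] => ([], plot, none)
  | l :: rest =>
    if pvFence l then ([], plot, some (l, rest))
    else if PySem.Chars.isIn pvShowCall l then pvScan plot rest
    else if PySem.Chars.startswith (PySem.Chars.strip l) pvShowParen then pvScan plot rest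
    else
      let res := pvScan (plot || pvPlot l) rest
      (l :: res.1, res.2)

theorem pvScan_length {plot : Bool} {lines body : List (List Char)} {pl : Bool}
    {f : List Char} {rest' : List (List Char)}
    (h : pvScan plot lines = (body, pl, some (f, rest'))) : rest'.length < lines.length := by
  induction lines generalizing plot body pl with
  | nil => simp [pvScan] at h
  | cons l rest ih =>
    simp only [pvScan] at h
    split_ifs at h with h1 h2 h3
    · simp only [Prod.mk.injEq, Option.some.injEq] at h
      obtain ⟨-, -, -, h⟩ := h
      subst h; simp
    · exact Nat.lt_succ_of_lt (ih h)
    · exact Nat.lt_succ_of_lt (ih h)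
    · rcases hres : pvScan (plot || pvPlot l) rest with ⟨b', pl', o'⟩
      rw [hres] at h
      simp only [Prod.mk.injEq] at h
      obtain ⟨-, -, ho⟩ := h
      subst ho
      exact Nat.lt_succ_of_lt (ih hres)

def pvOuter : List (List Char) → List (List Char)
  | [] => []
  | l :: rest =>
    if pvFence l then
      match h : pvScan false rest with
      | (body, _, none) => l :: body
      | (body, pl, some (f, rest')) =>
          l :: (body ++ (if pl then pvSavefig else []) ++ f :: pvOuter rest')
    else l :: pvOuter rest
termination_by lines => lines.length
decreasing_by
  · exact Nat.lt_succ_of_lt (pvScan_length h)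
  · simp

-- A's fold from an inside-a-block state, expressed through the inner scan
theorem foldl_cleanStep_inside (lines : List (List Char)) :
    ∀ (plot : Bool) (acc : List (List Char)),
    List.foldl cleanStep (true, plot, acc) lines =
      (match pvScan plot lines with
       | (body, pl, none) => (true, pl, acc ++ body)
       | (body, pl, some (f, rest')) =>
           List.foldl cleanStep (false, false, acc ++ body ++ (if pl then pvSavefig else []) ++ [f]) rest') := by
  induction lines with
  | nil => intro plot acc; simp [pvScan]
  | cons l rest ih =>
    intro plot acc
    by_cases h1 : pvFence l = true
    · simp [pvScan, h1, List.foldl_cons, cleanStep]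
    · by_cases h2 : PySem.Chars.isIn pvShowCall l = true
      · simpa [pvScan, h1, h2, List.foldl_cons, cleanStep] using ih plot acc
      · by_cases h3 : PySem.Chars.startswith (PySem.Chars.strip l) pvShowParen = true
        · simpa [pvScan, h1, h2, h3, List.foldl_cons, cleanStep] using ih plot acc
        · have := ih (plot || pvPlot l) (acc ++ [l])
          rcases hres : pvScan (plot || pvPlot l) rest with ⟨b', pl', o'⟩
          rw [hres] at this
          simp only [pvScan, List.foldl_cons, cleanStep, h1, h2, h3, hres,
            Bool.false_eq_true, if_false, if_true]
          rw [this]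
          rcases o' with _ | ⟨f', rest''⟩ <;> simp

-- A's fold from the outside state produces the outer block recursion
theorem foldl_cleanStep_outside (n : Nat) :
    ∀ (lines : List (List Char)), lines.length ≤ n → ∀ (acc : List (List Char)),
    (List.foldl cleanStep (false, false, acc) lines).2.2 = acc ++ pvOuter lines := by
  induction n with
  | zero =>
    intro lines hlen acc
    have : lines = [] := List.eq_nil_of_length_eq_zero (Nat.le_zero.mp hlen)
    subst this; simp [pvOuter]
  | succ n ih =>
    intro lines hlen acc
    match lines with
    | [] => simp [pvOuter]
    | l :: rest =>
      by_cases h1 : pvFence l = true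
      · rw [List.foldl_cons]
        simp only [cleanStep, h1, if_true, Bool.false_eq_true, if_false]
        rw [foldl_cleanStep_inside rest false (acc ++ [l])]
        rcases hres : pvScan false rest with ⟨body, pl, o'⟩
        rcases o' with _ | ⟨f, rest'⟩
        · conv_rhs => rw [pvOuter.eq_def]
          simp only [h1, if_true]
          clear ih
          split <;> rename_i heq <;> rw [hres] at heq <;> simp_all
        · have hlt : rest'.length ≤ n := by
            have := pvScan_length hres
            simp at hlen; omega
          rw [ih rest' hlt]
          conv_rhs => rw [pvOuter.eq_def]
          simp only [h1, if_true]
          clear ih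
          rcases pl <;>
            simp only [if_true, Bool.false_eq_true, if_false, List.append_nil] <;>
            (split <;> rename_i heq <;> rw [hres] at heq <;> simp_all)
      · rw [List.foldl_cons]
        simp only [cleanStep, h1, Bool.false_eq_true, if_false]
        rw [ih rest (by simp at hlen; omega)]
        conv_rhs => rw [pvOuter.eq_def]
        simp [h1]

-- pvFences recursion
theorem pvFences_nil : pvFences [] = [] := by rfl

theorem pvFences_cons (l : List Char) (rest : List (List Char)) :
    pvFences (l :: rest) =
      (if pvFence l then [0] else []) ++ (pvFences rest).map (· + 1) := by
  unfold pvFences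
  rw [List.length_cons, List.range_succ_eq_map]
  rw [List.filter_cons, List.filter_map]
  simp only [List.getD_cons_zero, List.getD_cons_succ, Function.comp]
  split <;> rfl

-- drop past an entire prefix
theorem pvDropLenAdd (pre rest : List (List Char)) (k : Nat) :
    List.drop (pre.length + k) (pre ++ rest) = List.drop k rest := by
  rw [List.drop_append]
  simp [List.drop_eq_nil_of_le]

-- shift lemma: pvBlocks ignores a prefix when indices and prev are shifted by its length
theorem pvBlocks_shift (n : Nat) : ∀ (fs : List Nat), fs.length ≤ n →
    ∀ (pre rest : List (List Char)) (prev : Nat),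
    pvBlocks (pre ++ rest) (pre.length + prev) (fs.map (· + pre.length)) =
      pvBlocks rest prev fs := by
  induction n with
  | zero =>
    intro fs hlen pre rest prev
    have : fs = [] := List.eq_nil_of_length_eq_zero (Nat.le_zero.mp hlen)
    subst this
    simp only [List.map_nil, pvBlocks, pvDropLenAdd]
  | succ n ih =>
    intro fs hlen pre rest prev
    match fs with
    | [] => simp [pvBlocks]
    | [a] =>
      simp only [List.map_cons, List.map_nil, pvBlocks]
      rw [show a + pre.length + 1 = pre.length + (a + 1) by omega]
      rw [pvDropLenAdd, pvDropLenAdd]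
      congr 2
      omega
    | a :: b :: fs' =>
      simp only [List.map_cons, pvBlocks]
      rw [show a + pre.length + 1 = pre.length + (a + 1) by omega,
          show b + pre.length + 1 = pre.length + (b + 1) by omega]
      rw [pvDropLenAdd, pvDropLenAdd]
      have hg : (pre ++ rest).getD (b + pre.length) [] = rest.getD b [] := by
        rw [show b + pre.length = pre.length + b by omega]
        simp [List.getD, List.getElem?_append_right (Nat.le_add_right pre.length b)]
      rw [hg,
          show pre.length + (a + 1) - (pre.length + prev) = a + 1 - prev by omega,
          show b + pre.length - (pre.length + (a + 1)) = b - (a + 1) by omega,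
          ih fs' (by simp only [List.length_cons] at hlen; omega) pre rest (b + 1)]

-- cons shift at prev = 0 for a non-fence head: the head is emitted verbatim
theorem pvBlocks_cons_zero (l : List Char) (rest : List (List Char)) (fs : List Nat) :
    pvBlocks (l :: rest) 0 (fs.map (· + 1)) = l :: pvBlocks rest 0 fs := by
  match fs with
  | [] => simp [pvBlocks]
  | [a] => simp [pvBlocks]
  | a :: b :: fs' =>
    simp only [List.map_cons, pvBlocks, Nat.sub_zero, List.drop_zero]
    have hs := pvBlocks_shift fs'.length fs' le_rfl [l] rest (b + 1)
    simp only [List.singleton_append, List.length_cons, List.length_nil] at hs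
    rw [show (1 : Nat) + (b + 1) = b + 1 + 1 by omega] at hs
    rw [hs]
    simp [List.getD_cons_succ]

-- pvFences [] means: no fence line at all
theorem pvFences_eq_nil (lines : List (List Char)) (h : pvFences lines = []) :
    ∀ l ∈ lines, pvFence l = false := by
  induction lines with
  | nil => simp
  | cons x rest ih =>
    rw [pvFences_cons] at h
    intro l hl
    rcases List.mem_cons.mp hl with rfl | hl'
    · by_contra hx
      simp [Bool.not_eq_false] at hx
      simp [hx] at h
    · have : (pvFences rest).map (· + 1) = [] := by
        rcases hf : pvFence x <;> simp [hf] at h <;> simp [h]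
      exact ih (by simpa using this) l hl'

-- first-fence decomposition of pvFences
theorem pvFences_head (rest : List (List Char)) :
    ∀ (b : Nat) (fs : List Nat), pvFences rest = b :: fs →
      (∀ l ∈ rest.take b, pvFence l = false) ∧
      pvFence (rest.getD b []) = true ∧
      rest = rest.take b ++ rest.getD b [] :: rest.drop (b + 1) ∧
      fs = (pvFences (rest.drop (b + 1))).map (· + (b + 1)) := by
  induction rest with
  | nil => intro b fs h; simp [pvFences_nil] at h
  | cons x r ih =>
    intro b fs h
    rw [pvFences_cons] at h
    rcases hf : pvFence x with hF | hT
    · -- head not a fence: indices shift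
      simp only [hf, Bool.false_eq_true, if_false, List.nil_append] at h
      rcases hr : pvFences r with _ | ⟨b', fs'⟩
      · rw [hr] at h; simp at h
      · rw [hr] at h
        simp only [List.map_cons, List.cons.injEq] at h
        obtain ⟨rfl, rfl⟩ := h
        obtain ⟨c1, c2, c3, c4⟩ := ih b' fs' hr
        refine ⟨?_, ?_, ?_, ?_⟩
        · intro l hl
          simp only [List.take_succ_cons] at hl
          rcases List.mem_cons.mp hl with rfl | hl'
          · exact hf
          · exact c1 l hl'
        · simpa using c2
        · simp only [List.take_succ_cons, List.getD_cons_succ, List.drop_succ_cons,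
            List.cons_append]
          rw [← c3]
        · simp only [List.drop_succ_cons]
          rw [c4, List.map_map]
          exact List.map_congr_left (fun i _ => by simp only [Function.comp_apply]; omega)
    · -- head is the first fence: b = 0
      simp only [hf, if_true] at h
      simp only [List.singleton_append, List.cons.injEq] at h
      obtain ⟨rfl, rfl⟩ := h
      refine ⟨by simp, by simpa using hf, by simp, by simp⟩

-- pvScan on a fence-free list: filter + plotting flag, unclosed
theorem pvScan_no_fence (rest : List (List Char)) (h : ∀ l ∈ rest, pvFence l = false) :
    ∀ plot, pvScan plot rest =
      (rest.filter pvKeep, plot || (rest.filter pvKeep).any pvPlot, none) := by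
  induction rest with
  | nil => intro plot; simp [pvScan]
  | cons l r ih =>
    intro plot
    have hf : pvFence l = false := h l (by simp)
    have hr : ∀ l' ∈ r, pvFence l' = false := fun l' hl' => h l' (by simp [hl'])
    by_cases h2 : PySem.Chars.isIn pvShowCall l = true
    · have hk : pvKeep l = false := by simp [pvKeep, h2]
      simp only [pvScan, hf, Bool.false_eq_true, if_false, h2, if_true]
      rw [ih hr plot, List.filter_cons, hk]
      simp
    · by_cases h3 : PySem.Chars.startswith (PySem.Chars.strip l) pvShowParen = true
      · have hk : pvKeep l = false := by simp [pvKeep, h3]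
        simp only [pvScan, hf, Bool.false_eq_true, if_false, h2, if_true, h3]
        rw [ih hr plot, List.filter_cons, hk]
        simp
      · have hk : pvKeep l = true := by simp [pvKeep, h2, h3]
        simp only [pvScan, hf, Bool.false_eq_true, if_false, h2, h3, if_true]
        rw [ih hr (plot || pvPlot l), List.filter_cons, hk]
        simp [Bool.or_assoc]

-- pvScan up to the first fence: filter + plotting flag, closed with remainder
theorem pvScan_to_fence (pre : List (List Char)) (h : ∀ l ∈ pre, pvFence l = false)
    (f : List Char) (post : List (List Char)) (hf : pvFence f = true) :
    ∀ plot, pvScan plot (pre ++ f :: post) =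
      (pre.filter pvKeep, plot || (pre.filter pvKeep).any pvPlot, some (f, post)) := by
  induction pre with
  | nil => intro plot; simp [pvScan, hf]
  | cons l r ih =>
    intro plot
    have hl : pvFence l = false := h l (by simp)
    have hr : ∀ l' ∈ r, pvFence l' = false := fun l' hl' => h l' (by simp [hl'])
    by_cases h2 : PySem.Chars.isIn pvShowCall l = true
    · have hk : pvKeep l = false := by simp [pvKeep, h2]
      simp only [List.cons_append, pvScan, hl, Bool.false_eq_true, if_false, h2, if_true]
      rw [ih hr plot, List.filter_cons, hk]
      simp
    · by_cases h3 : PySem.Chars.startswith (PySem.Chars.strip l) pvShowParen = true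
      · have hk : pvKeep l = false := by simp [pvKeep, h3]
        simp only [List.cons_append, pvScan, hl, Bool.false_eq_true, if_false, h2, h3, if_true]
        rw [ih hr plot, List.filter_cons, hk]
        simp
      · have hk : pvKeep l = true := by simp [pvKeep, h2, h3]
        simp only [List.cons_append, pvScan, hl, Bool.false_eq_true, if_false, h2, h3, if_true]
        rw [ih hr (plot || pvPlot l), List.filter_cons, hk]
        simp [Bool.or_assoc]

-- main bridge: the outer block recursion equals B's fence-index assembly
theorem pvOuter_eq_pvBlocks (n : Nat) : ∀ (lines : List (List Char)), lines.length ≤ n →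
    pvOuter lines = pvBlocks lines 0 (pvFences lines) := by
  induction n with
  | zero =>
    intro lines hlen
    have : lines = [] := List.eq_nil_of_length_eq_zero (Nat.le_zero.mp hlen)
    subst this; simp [pvOuter, pvFences_nil, pvBlocks]
  | succ n ih =>
    intro lines hlen
    match lines with
    | [] => simp [pvOuter, pvFences_nil, pvBlocks]
    | l :: rest =>
      rw [pvFences_cons]
      by_cases h1 : pvFence l = true
      · rw [h1]
        simp only [if_true, List.singleton_append]
        rcases hr : pvFences rest with _ | ⟨b, fs⟩
        · -- no fence in rest: whole tail is an unclosed block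
          have hnf := pvFences_eq_nil rest hr
          rw [pvOuter.eq_def]
          simp only [h1, if_true]
          rw [List.map_nil]
          split <;> rename_i heq <;> rw [pvScan_no_fence rest hnf false] at heq
          · simp only [Prod.mk.injEq] at heq
            obtain ⟨rfl, -, -⟩ := heq
            simp [pvBlocks, pvFilterBody]
          · simp at heq
        · -- closed block: decompose rest at the first fence b
          obtain ⟨c1, c2, c3, c4⟩ := pvFences_head rest b fs hr
          have hb : b < rest.length := by
            by_contra hbn
            push_neg at hbn
            have hnil : rest.drop (b + 1) = [] := List.drop_eq_nil_of_le (by omega)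
            have hlc := congrArg List.length c3
            rw [hnil] at hlc
            simp [List.length_take, Nat.min_eq_right hbn] at hlc
          have hscan : pvScan false rest =
              ((rest.take b).filter pvKeep,
               ((rest.take b).filter pvKeep).any pvPlot,
               some (rest.getD b [], rest.drop (b + 1))) := by
            conv_lhs => rw [c3]
            rw [pvScan_to_fence (rest.take b) c1 (rest.getD b []) (rest.drop (b + 1)) c2,
              Bool.false_or]
          have hpost : (rest.drop (b + 1)).length ≤ n := by
            simp only [List.length_drop]
            simp only [List.length_cons] at hlen
            omega
          rw [pvOuter.eq_def]
          simp only [h1, if_true]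
          split <;> rename_i heq <;> rw [hscan] at heq
          · simp at heq
          · simp only [Prod.mk.injEq, Option.some.injEq] at heq
            obtain ⟨rfl, rfl, rfl, rfl⟩ := heq
            -- compute pvBlocks on 0 :: (b+1) :: …
            simp only [List.map_cons, pvBlocks, Nat.sub_zero, List.drop_zero,
              List.take_succ_cons, List.take_zero, List.drop_succ_cons]
            rw [show b + 1 - (0 + 1) = b by omega]
            have hgd : (l :: rest).getD (b + 1) [] = rest.getD b [] := by
              simp [List.getD_cons_succ]
            rw [hgd]
            have hlenpre : (l :: rest.take b ++ [rest.getD b []]).length = b + 1 + 1 := by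
              simp [List.length_take, Nat.min_eq_left (le_of_lt hb)]
            have htail : pvBlocks (l :: rest) (b + 1 + 1) (fs.map (· + 1)) =
                pvBlocks (rest.drop (b + 1)) 0 (pvFences (rest.drop (b + 1))) := by
              rw [c4, List.map_map]
              have hmap : (pvFences (rest.drop (b + 1))).map ((· + 1) ∘ (· + (b + 1))) =
                  (pvFences (rest.drop (b + 1))).map (· + (b + 1 + 1)) := by
                exact List.map_congr_left (fun i _ => by simp only [Function.comp_apply]; omega)
              rw [hmap]
              have hsplit : l :: rest =
                  (l :: rest.take b ++ [rest.getD b []]) ++ rest.drop (b + 1) := by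
                simp only [List.cons_append, List.append_assoc, List.nil_append,
                  List.singleton_append]
                rw [← c3]
              have := pvBlocks_shift (pvFences (rest.drop (b + 1))).length
                (pvFences (rest.drop (b + 1))) le_rfl
                (l :: rest.take b ++ [rest.getD b []]) (rest.drop (b + 1)) 0
              rw [hlenpre, Nat.add_zero, ← hsplit] at this
              exact this
            rw [htail, ih (rest.drop (b + 1)) hpost]
            simp [pvFilterBody]
      · -- non-fence head: emitted verbatim on both sides
        rw [Bool.not_eq_true] at h1
        rw [h1]
        simp only [Bool.false_eq_true, if_false, List.nil_append]
        rw [pvOuter.eq_def]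
        simp only [h1, Bool.false_eq_true, if_false]
        rw [pvBlocks_cons_zero, ih rest (by simp at hlen; omega)]

-- ===== VERDICT (by name: the statement is the Claim_ definition above) =====
theorem clean_code_for_execution_spec : Claim_equal_clean_code_for_execution := by
  intro code _
  unfold Spec_clean_code_for_execution clean_code_for_execution clean_code_for_execution_alt
  simp only []
  rw [foldl_cleanStep_outside (PySem.Chars.splitOn code.toList ['\n']).length _ le_rfl]
  rw [pvOuter_eq_pvBlocks (PySem.Chars.splitOn code.toList ['\n']).length _ le_rfl]
  simp
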